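-- pv_equiv track=rewrite | github.com/Coolmansam123/reform-crm | execution/cleanup_slash_firms.py | clean_firm_name
-- ===== SOURCE A (Python) =====
-- def clean_firm_name(name):
--     """Strip extra whitespace, emails, phone numbers from firm name."""
--     name = name.strip()
--     # Remove trailing email patterns
--     parts = name.split()
--     cleaned = []
--     for p in parts:
--         if "@" in p:
--             continue  # skip emails
--         if p.lower() in ("in", "negotiations", "negotiating"):
--             break  # stop at negotiation notes
--         cleaned.append(p)
--     return " ".join(cleaned).strip()
-- ===== SOURCE B (Python) =====
-- def clean_firm_name(name):
--     """Strip extra whitespace, emails, phone numbers from firm name."""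
--     kept = []
--     for p in reversed(name.strip().split()):
--         if p.lower() in ("in", "negotiations", "negotiating"):
--             kept = []  # everything after the last keyword so far is discarded
--         elif "@" not in p:
--             kept = [p] + kept
--     return " ".join(kept).strip()
-- ===== Notes on version B (the rewrite author's own statement) =====
-- stated objective: alternative
-- what changed: B traverses the tokens back-to-front with a reset-on-keyword accumulator (prepending kept tokens, discarding the whole accumulator whenever a negotiation keyword is seen), instead of A's forward loop with continue/break.
import Mathlib
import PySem

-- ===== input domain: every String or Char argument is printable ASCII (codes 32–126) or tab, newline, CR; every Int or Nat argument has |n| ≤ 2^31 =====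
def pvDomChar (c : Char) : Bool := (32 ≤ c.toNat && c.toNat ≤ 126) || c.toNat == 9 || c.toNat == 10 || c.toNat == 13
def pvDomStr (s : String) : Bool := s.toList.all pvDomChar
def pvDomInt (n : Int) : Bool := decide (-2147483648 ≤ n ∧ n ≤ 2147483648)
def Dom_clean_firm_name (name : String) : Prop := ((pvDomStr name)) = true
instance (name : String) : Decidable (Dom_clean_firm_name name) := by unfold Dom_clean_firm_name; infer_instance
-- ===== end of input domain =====

-- B computes the same cleaned firm name by traversing the tokens back-to-front
-- with an accumulator that is reset whenever a negotiation keyword is seen and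
-- that kept tokens are prepended to, instead of A's forward loop with
-- continue/break (objective: alternative, same cost).


-- membership test p.lower() in ("in", "negotiations", "negotiating"),
-- written identically in both Pythons
def pvKw (p : String) : Bool :=
  PySem.Str.lower p == "in" || PySem.Str.lower p == "negotiations" || PySem.Str.lower p == "negotiating"

-- ===== PORT A =====
-- A's for-loop over parts: continue on '@', break on a keyword, else append
def pvALoop : List String → List String
  | [] => []
  | p :: rest =>
    if PySem.Str.isIn "@" p then pvALoop rest          -- continue (skip emails)
    else if pvKw p then []                             -- break (negotiation notes)
    else p :: pvALoop rest                             -- cleaned.append(p)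

def clean_firm_name (name : String) : String :=
  let name := PySem.Str.strip name
  let parts := PySem.Str.split₀ name
  PySem.Str.strip (PySem.Str.join " " (pvALoop parts))

-- ===== PORT B =====
-- B's loop body: reset the accumulator on a keyword, else prepend non-email tokens
def pvBStep (kept : List String) (p : String) : List String :=
  if pvKw p then []                                    -- kept = []
  else if PySem.Str.isIn "@" p then kept               -- (elif falls through)
  else p :: kept                                       -- kept = [p] + kept

def clean_firm_name_alt (name : String) : String :=
  let kept := (PySem.Str.split₀ (PySem.Str.strip name)).reverse.foldl pvBStep []
  PySem.Str.strip (PySem.Str.join " " kept)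

-- ===== PRECONDITION & SPEC =====
def Spec_clean_firm_name (name : String) (out : String) : Prop := out = clean_firm_name_alt name
instance (name : String) (out : String) : Decidable (Spec_clean_firm_name name out) := by unfold Spec_clean_firm_name; infer_instance

-- ===== CLAIM (what is proved, stated in full; the proofs are below) =====
def Claim_equal_clean_firm_name : Prop := ∀ (name : String), Dom_clean_firm_name name → Spec_clean_firm_name name (clean_firm_name name)

-- ===== LEMMAS AND PROOFS =====

-- a keyword token never contains '@'
lemma pvKw_no_at (p : String) (h : pvKw p = true) : PySem.Str.isIn "@" p = false := by
  by_contra hc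
  have hin : PySem.Str.isIn "@" p = true := by
    cases hq : PySem.Str.isIn "@" p
    · exact absurd hq hc
    · rfl
  have hmem : '@' ∈ p.toList := by
    have := (PySem.Str.isIn_iff_infix "@" p).mp hin
    exact this.subset (by simp)
  have hmap : PySem.Chars.lowerChar '@' ∈ p.toList.map PySem.Chars.lowerChar :=
    List.mem_map_of_mem hmem
  have hlow : (PySem.Str.lower p).toList = p.toList.map PySem.Chars.lowerChar := by
    simp [PySem.Chars.lower]
  have hat : PySem.Chars.lowerChar '@' = '@' := by decide
  rw [hat] at hmap
  unfold pvKw at h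
  rcases Bool.or_eq_true_iff.mp h with h' | h3
  · rcases Bool.or_eq_true_iff.mp h' with h1 | h2
    · have he : (PySem.Str.lower p) = "in" := eq_of_beq h1
      rw [← hat, ← hlow, congrArg String.toList he, hat] at hmap
      exact absurd hmap (by decide)
    · have he : (PySem.Str.lower p) = "negotiations" := eq_of_beq h2
      rw [← hat, ← hlow, congrArg String.toList he, hat] at hmap
      exact absurd hmap (by decide)
  · have he : (PySem.Str.lower p) = "negotiating" := eq_of_beq h3
    rw [← hat, ← hlow, congrArg String.toList he, hat] at hmap
    exact absurd hmap (by decide)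

-- B's backwards foldl is the right fold of pvBStep, which agrees with A's loop
lemma pvBStep_foldr_eq (l : List String) :
    l.foldr (fun p kept => pvBStep kept p) [] = pvALoop l := by
  induction l with
  | nil => rfl
  | cons p rest ih =>
    rw [List.foldr_cons, ih]
    by_cases hk : pvKw p = true
    · have ha : PySem.Chars.isIn ['@'] p.toList = false := by
        simpa using pvKw_no_at p hk
      simp [pvBStep, pvALoop, PySem.Str.isIn, hk, ha]
    · have hk' : pvKw p = false := by
        cases hq : pvKw p
        · rfl
        · exact absurd hq hk
      by_cases ha : PySem.Chars.isIn ['@'] p.toList = true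
      · simp [pvBStep, pvALoop, PySem.Str.isIn, hk', ha]
      · have ha' : PySem.Chars.isIn ['@'] p.toList = false := by
          cases hq : PySem.Chars.isIn ['@'] p.toList
          · rfl
          · exact absurd hq ha
        simp [pvBStep, pvALoop, PySem.Str.isIn, hk', ha']

-- ===== VERDICT (by name: the statement is the Claim_ definition above) =====
theorem clean_firm_name_spec : Claim_equal_clean_firm_name := by
  intro name _
  unfold Spec_clean_firm_name
  simp only [clean_firm_name, clean_firm_name_alt]
  rw [List.foldl_reverse, pvBStep_foldr_eq]
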